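-- pv_equiv track=rewrite | github.com/lafourcadep/SL-CSA | 4_train_slcsa_tool/train_slcsa_tool.py | compute_ncomps
-- ===== SOURCE A (Python) =====
-- def compute_ncomps(twojmax): # ok
--     n_idx=0
--     for j1 in range(0,twojmax+1):
--         for j2 in range(0,j1+1):
--             for j in range(int(abs(j1-j2)),min(twojmax,j1+j2)+1,2):
--                 if((j+j1+j2)%2 == 1):
--                     continue
--                 if(j<j1):
--                     continue
--                 n_idx+=1
--     nidx=n_idx
--     return nidx
-- ===== SOURCE B (Python) =====
-- def compute_ncomps(twojmax):
--     # Count, per (j1, j2), the arithmetic progression j1+(j2%2), +2, ..., up to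
--     # min(twojmax, j1+j2) in closed form instead of scanning j.
--     n = 0
--     for j1 in range(twojmax + 1):
--         for j2 in range(j1 + 1):
--             ub = min(twojmax, j1 + j2)
--             lo = j1 + (j2 % 2)
--             if lo <= ub:
--                 n += (ub - lo) // 2 + 1
--     return n
-- ===== Notes on version B (the rewrite author's own statement) =====
-- stated objective: faster
-- what changed: The innermost j-loop (with its parity and j<j1 filters) is replaced by a closed-form arithmetic-progression count per (j1,j2) pair, dropping one loop nesting level.
import Mathlib
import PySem

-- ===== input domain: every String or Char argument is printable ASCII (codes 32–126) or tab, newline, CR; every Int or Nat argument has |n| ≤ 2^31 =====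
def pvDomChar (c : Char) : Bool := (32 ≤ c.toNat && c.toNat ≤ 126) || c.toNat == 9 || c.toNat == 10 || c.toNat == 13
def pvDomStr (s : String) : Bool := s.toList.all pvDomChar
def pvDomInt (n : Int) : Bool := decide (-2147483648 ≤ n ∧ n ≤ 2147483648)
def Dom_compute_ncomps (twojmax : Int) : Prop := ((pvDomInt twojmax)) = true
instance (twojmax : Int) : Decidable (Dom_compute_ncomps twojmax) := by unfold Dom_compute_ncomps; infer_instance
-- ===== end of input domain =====

-- B replaces A's innermost j-scan by a closed-form arithmetic-progression count (O(n^2) loop iterations instead of O(n^3)).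

-- ===== PORT A =====
def compute_ncomps (twojmax : Int) : Int :=
  let n_idx : Int :=
    (PySem.List.pyRange 0 (twojmax + 1) 1).foldl (fun n_idx j1 =>
      (PySem.List.pyRange 0 (j1 + 1) 1).foldl (fun n_idx j2 =>
        (PySem.List.pyRange |j1 - j2| (min twojmax (j1 + j2) + 1) 2).foldl (fun n_idx j =>
          if PySem.Int.mod (j + j1 + j2) 2 == 1 then n_idx
          else if j < j1 then n_idx
          else n_idx + 1) n_idx) n_idx) 0
  n_idx

-- ===== PORT B =====
def compute_ncomps_alt (twojmax : Int) : Int :=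
  (PySem.List.pyRange 0 (twojmax + 1) 1).foldl (fun n j1 =>
    (PySem.List.pyRange 0 (j1 + 1) 1).foldl (fun n j2 =>
      let ub := min twojmax (j1 + j2)
      let lo := j1 + PySem.Int.mod j2 2
      if lo ≤ ub then n + (PySem.Int.floordiv (ub - lo) 2 + 1) else n) n) 0

-- ===== PRECONDITION & SPEC =====
def Spec_compute_ncomps (twojmax : Int) (out : Int) : Prop := out = compute_ncomps_alt twojmax
instance (twojmax : Int) (out : Int) : Decidable (Spec_compute_ncomps twojmax out) := by unfold Spec_compute_ncomps; infer_instance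

-- ===== CLAIM (what is proved, stated in full; the proofs are below) =====
def Claim_equal_compute_ncomps : Prop := ∀ (twojmax : Int), Dom_compute_ncomps twojmax → Spec_compute_ncomps twojmax (compute_ncomps twojmax)

-- ===== LEMMAS AND PROOFS =====

-- counting the elements ≥ t of the progression a, a+2, …, a+2(n-1)
lemma pv_foldl_count_ge (t : Int) (n : Nat) : ∀ (a acc : Int),
    ((List.range n).map (fun (k : Nat) => a + 2 * (k : Int))).foldl
      (fun m j => if j < t then m else m + 1) acc
    = acc + ((n - ((t - a + 1) / 2).toNat : Nat) : Int) := by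
  induction n with
  | zero => intro a acc; simp
  | succ n ih =>
    intro a acc
    rw [List.range_succ, List.map_append, List.foldl_append, ih]
    simp only [List.map_cons, List.map_nil, List.foldl_cons, List.foldl_nil]
    split_ifs with h <;> omega

-- the closed-form count equals B's per-(j1,j2) contribution
lemma pv_arith (j1 j2 ub acc : Int) (h0 : 0 ≤ j2) (_h1 : j2 ≤ j1) (h2 : j1 ≤ ub)
    (h3 : ub ≤ j1 + j2) :
    acc + ((((ub + 1 - (j1 - j2) + 2 - 1) / 2).toNat - ((j1 - (j1 - j2) + 1) / 2).toNat : Nat) : Int)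
    = if j1 + PySem.Int.mod j2 2 ≤ ub then acc + (PySem.Int.floordiv (ub - (j1 + PySem.Int.mod j2 2)) 2 + 1) else acc := by
  rw [PySem.Int.mod_eq_emod_of_pos (by norm_num), PySem.Int.floordiv_eq_ediv_of_pos (by norm_num)]
  split_ifs with h <;> omega

-- ===== VERDICT (by name: the statement is the Claim_ definition above) =====
theorem compute_ncomps_spec : Claim_equal_compute_ncomps := by
  intro tw _
  unfold Spec_compute_ncomps compute_ncomps compute_ncomps_alt
  refine PySem.List.foldl_congr_mem _ _ _ _ ?_
  intro acc j1 hj1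
  rw [PySem.List.mem_pyRange_one] at hj1
  refine PySem.List.foldl_congr_mem _ _ _ _ ?_
  intro acc2 j2 hj2
  rw [PySem.List.mem_pyRange_one] at hj2
  have habs : |j1 - j2| = j1 - j2 := abs_of_nonneg (by omega)
  rw [habs]
  -- the parity test in A never fires along its own range
  have hpar := PySem.List.foldl_congr_mem
      (PySem.List.pyRange (j1 - j2) (min tw (j1 + j2) + 1) 2)
      (fun n_idx j => if PySem.Int.mod (j + j1 + j2) 2 == 1 then n_idx
        else if j < j1 then n_idx else n_idx + 1)
      (fun m j => if j < j1 then m else m + 1) acc2 (by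
    intro m j hj
    rw [PySem.List.mem_pyRange_iff_of_pos (by norm_num)] at hj
    obtain ⟨_, _, hd⟩ := hj
    simp only [PySem.Int.mod_eq_emod_of_pos (by norm_num : (0:Int) < 2)]
    simp
    intro h
    exfalso
    omega)
  rw [hpar]
  have hub1 : j1 ≤ min tw (j1 + j2) := le_min (by omega) (by omega)
  have hub2 : min tw (j1 + j2) ≤ j1 + j2 := min_le_right _ _
  rw [PySem.List.pyRange_of_pos _ _ (by norm_num : (0:Int) < 2),
      if_pos (by omega : j1 - j2 < min tw (j1 + j2) + 1),
      pv_foldl_count_ge]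
  exact pv_arith j1 j2 (min tw (j1 + j2)) acc2 (by omega) (by omega) hub1 hub2
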